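-- pv_equiv track=rewrite | github.com/vadim-kuts/codility_assessment | solution.py | solution
-- ===== SOURCE A (Python) =====
-- def solution(blocks):
--     lb = len(blocks)
--     if lb >= 2 and lb <= 200000:
--         res = 0
--         for i in range(lb):
--             if blocks[i] >= 1 and blocks[i] <= 1000000000:
--                 j = i
--                 while j < lb-1 and blocks[j+1] >= blocks[j]:
--                     j += 1
--                 h = j
--                 j = i
--                 while j > 0 and blocks[j-1] >= blocks[j]:
--                     j -= 1
--                 l = j
--                 res = max(res, h - l + 1 )
--         return res
-- ===== SOURCE B (Python) =====
-- def solution(blocks):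
--     n = len(blocks)
--     if n < 2 or n > 200000:
--         return None
--     # left[i] = start of the maximal non-increasing run ending at i (going left)
--     left = []
--     start = 0
--     for i in range(n):
--         if i > 0 and blocks[i - 1] < blocks[i]:
--             start = i
--         left.append(start)
--     # right[i] = end of the maximal non-decreasing run starting at i
--     right = [0] * n
--     end = n - 1
--     for i in range(n - 1, -1, -1):
--         if i < n - 1 and blocks[i + 1] < blocks[i]:
--             end = i
--         right[i] = end
--     best = 0
--     for i in range(n):
--         if 1 <= blocks[i] <= 1000000000:
--             best = max(best, right[i] - left[i] + 1)
--     return best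
-- ===== Notes on version B (the rewrite author's own statement) =====
-- stated objective: alternative
-- what changed: A rescans the whole monotone run left and right from every index with two inner while-loops; B precomputes, in two linear passes, the start of the non-increasing run ending at each index and the end of the non-decreasing run starting at each index, then combines them in one pass.
import Mathlib
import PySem

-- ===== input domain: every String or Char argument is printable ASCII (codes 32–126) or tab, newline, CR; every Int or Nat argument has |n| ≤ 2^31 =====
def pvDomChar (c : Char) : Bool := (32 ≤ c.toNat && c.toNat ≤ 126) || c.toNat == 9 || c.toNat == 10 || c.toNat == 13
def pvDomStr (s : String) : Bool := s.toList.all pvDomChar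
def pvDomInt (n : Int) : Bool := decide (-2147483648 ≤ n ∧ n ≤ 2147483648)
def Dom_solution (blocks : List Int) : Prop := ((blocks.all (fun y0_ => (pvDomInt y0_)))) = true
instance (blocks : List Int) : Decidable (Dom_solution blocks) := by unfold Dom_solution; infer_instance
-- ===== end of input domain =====

-- B replaces A's per-index while-loop scans by two linear passes that precompute
-- the run boundaries once, then combines them in a single pass.

-- ===== PORT A =====
-- inner while loop: j = i; while j < lb-1 and blocks[j+1] >= blocks[j]: j += 1
def aHi (blocks : List Int) (j : Nat) : Nat :=
  if h : j + 1 < blocks.length ∧ blocks.getD j 0 ≤ blocks.getD (j+1) 0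
  then aHi blocks (j+1) else j
termination_by blocks.length - j
decreasing_by omega

-- inner while loop: j = i; while j > 0 and blocks[j-1] >= blocks[j]: j -= 1
def aLo (blocks : List Int) : Nat → Nat
  | 0 => 0
  | j+1 => if blocks.getD j 0 ≥ blocks.getD (j+1) 0 then aLo blocks j else j+1

def solution (blocks : List Int) : Option Int :=
  let lb := blocks.length
  if 2 ≤ lb ∧ lb ≤ 200000 then
    some ((List.range lb).foldl (fun res i =>
      if 1 ≤ blocks.getD i 0 ∧ blocks.getD i 0 ≤ 1000000000 then
        max res ((aHi blocks i : Int) - (aLo blocks i : Int) + 1)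
      else res) 0)
  else none

-- ===== PORT B =====
-- forward pass: left[i] = start of the maximal non-increasing run ending at i
def bLeft (blocks : List Int) : List Nat :=
  ((List.range blocks.length).foldl
    (fun (p : Nat × List Nat) i =>
      let start := if 0 < i ∧ blocks.getD (i-1) 0 < blocks.getD i 0 then i else p.1
      (start, p.2 ++ [start])) (0, [])).2

-- backward pass: right[i] = end of the maximal non-decreasing run starting at i
def bRight (blocks : List Int) : List Nat :=
  ((List.range blocks.length).reverse.foldl
    (fun (p : Nat × List Nat) i =>
      let e := if i + 1 < blocks.length ∧ blocks.getD (i+1) 0 < blocks.getD i 0 then i else p.1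
      (e, e :: p.2)) (blocks.length - 1, [])).2

def solution_alt (blocks : List Int) : Option Int :=
  let n := blocks.length
  if n < 2 ∨ n > 200000 then none
  else
    let L := bLeft blocks
    let R := bRight blocks
    some ((List.range n).foldl (fun best i =>
      if 1 ≤ blocks.getD i 0 ∧ blocks.getD i 0 ≤ 1000000000 then
        max best ((R.getD i 0 : Int) - (L.getD i 0 : Int) + 1)
      else best) 0)

-- ===== PRECONDITION & SPEC =====
def Spec_solution (blocks : List Int) (out : Option Int) : Prop := out = solution_alt blocks
instance (blocks : List Int) (out : Option Int) : Decidable (Spec_solution blocks out) := by unfold Spec_solution; infer_instance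

-- ===== CLAIM (what is proved, stated in full; the proofs are below) =====
def Claim_equal_solution : Prop := ∀ (blocks : List Int), Dom_solution blocks → Spec_solution blocks (solution blocks)

-- ===== LEMMAS AND PROOFS =====

-- the forward pass computes aLo at every index
theorem bLeft_fold (blocks : List Int) (k : Nat) :
    (List.range k).foldl
      (fun (p : Nat × List Nat) i =>
        let start := if 0 < i ∧ blocks.getD (i-1) 0 < blocks.getD i 0 then i else p.1
        (start, p.2 ++ [start])) (0, [])
    = (aLo blocks (k-1), (List.range k).map (aLo blocks)) := by
  induction k with
  | zero => simp [aLo]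
  | succ k ih =>
    have hstart : (if 0 < k ∧ blocks.getD (k-1) 0 < blocks.getD k 0 then k else aLo blocks (k-1))
        = aLo blocks k := by
      match k with
      | 0 => simp [aLo]
      | m+1 => simp only [aLo]; split_ifs with h1 h2 <;> simp_all <;> omega
    rw [List.range_succ, List.foldl_append, ih, List.foldl_cons, List.foldl_nil]
    dsimp only
    rw [hstart, List.map_append]
    simp

theorem bLeft_eq (blocks : List Int) :
    bLeft blocks = (List.range blocks.length).map (aLo blocks) := by
  unfold bLeft; rw [bLeft_fold]

-- the backward pass computes aHi at every index
theorem bRight_aux (blocks : List Int) (b : Nat) : ∀ (a : Nat) (s : Nat × List Nat),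
    a + b ≤ blocks.length →
    s.1 = (if a + b < blocks.length then aHi blocks (a+b) else blocks.length - 1) →
    (List.range' a b).reverse.foldl
      (fun (p : Nat × List Nat) i =>
        let e := if i + 1 < blocks.length ∧ blocks.getD (i+1) 0 < blocks.getD i 0 then i else p.1
        (e, e :: p.2)) s
    = (if b = 0 then s.1 else aHi blocks a, (List.range' a b).map (aHi blocks) ++ s.2) := by
  induction b with
  | zero => intro a s _ _; simp
  | succ b ih =>
    intro a s hle hs
    have hcons : (List.range' a (b+1)).reverse = (a+b) :: (List.range' a b).reverse := by
      rw [List.range'_1_concat, List.reverse_append]; simp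
    rw [hcons, List.foldl_cons]
    dsimp only
    rw [← Nat.add_assoc] at hs
    have hab : a + b < blocks.length := by omega
    have heq : (if a + b + 1 < blocks.length ∧ blocks.getD (a+b+1) 0 < blocks.getD (a+b) 0
             then a + b else s.1) = aHi blocks (a+b) := by
      by_cases h1 : a + b + 1 < blocks.length
      · rw [if_pos h1] at hs
        by_cases h2 : blocks.getD (a+b+1) 0 < blocks.getD (a+b) 0
        · rw [if_pos ⟨h1, h2⟩]
          rw [aHi, dif_neg]
          rintro ⟨_, hle2⟩; omega
        · rw [if_neg (by tauto), hs]
          conv_rhs => rw [aHi]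
          rw [dif_pos ⟨by omega, by omega⟩]
      · rw [if_neg (by tauto), hs, if_neg (by omega)]
        rw [aHi, dif_neg (by rintro ⟨h2, _⟩; omega)]
        omega
    rw [heq]
    have h2 := ih a (aHi blocks (a+b), aHi blocks (a+b) :: s.2) (by omega) (by simp [hab])
    dsimp only at h2
    rw [h2, Prod.mk.injEq]
    refine ⟨?_, ?_⟩
    · by_cases hb : b = 0
      · subst hb; simp
      · simp [hb]
    · rw [List.range'_1_concat, List.map_append, List.append_assoc]
      simp

theorem bRight_eq (blocks : List Int) :
    bRight blocks = (List.range blocks.length).map (aHi blocks) := by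
  rcases Nat.eq_zero_or_pos blocks.length with h0 | hpos
  · simp [bRight, h0]
  · have h2 := bRight_aux blocks blocks.length 0 (blocks.length - 1, []) (by omega) (by simp)
    simp only [bRight]
    rw [List.range_eq_range', h2]
    have hb : blocks.length ≠ 0 := by omega
    simp [hb]

theorem map_getD_range {f : Nat → Nat} {n i : Nat} (h : i < n) :
    ((List.range n).map f).getD i 0 = f i := by
  rw [List.getD_eq_getElem?_getD, List.getElem?_map, List.getElem?_range h]
  rfl

-- ===== VERDICT (by name: the statement is the Claim_ definition above) =====
theorem solution_spec : Claim_equal_solution := by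
  intro blocks _
  unfold Spec_solution solution solution_alt
  by_cases hn : 2 ≤ blocks.length ∧ blocks.length ≤ 200000
  · rw [if_pos hn, if_neg (by omega)]
    congr 1
    apply PySem.List.foldl_congr_mem
    intro acc i hi
    have hi' : i < blocks.length := List.mem_range.mp hi
    rw [bLeft_eq, bRight_eq, map_getD_range hi', map_getD_range hi']
  · rw [if_neg hn, if_pos (by omega)]
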